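-- pv_equiv track=rewrite | github.com/peterostrander2/ai-betting-backend | trap_learning_loop.py | calculate_numerology_day
-- ===== SOURCE A (Python) =====
-- def calculate_numerology_day(date_str: str) -> int:
--     """Calculate numerology day (reduce date to single digit 1-9)."""
--     # Parse date
--     if isinstance(date_str, str):
--         parts = date_str.replace("-", "").replace("/", "")
--         total = sum(int(d) for d in parts if d.isdigit())
--     else:
--         total = date_str.day + date_str.month + date_str.year
--
--     # Reduce to single digit
--     while total > 9:
--         total = sum(int(d) for d in str(total))
--
--     return total
-- ===== SOURCE B (Python) =====
-- def calculate_numerology_day(date_str: str) -> int: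
--     """Calculate numerology day (reduce date to single digit 1-9)."""
--     if isinstance(date_str, str):
--         total = sum(int(c) for c in date_str if c.isdigit())
--     else:
--         total = date_str.day + date_str.month + date_str.year
--     # closed-form digital root instead of the repeated digit-sum loop
--     return 0 if total == 0 else 1 + (total - 1) % 9
-- ===== Notes on version B (the rewrite author's own statement) =====
-- stated objective: idiomatic
-- what changed: Replaces the while-loop of repeated string digit sums with the closed-form digital root 1+(total-1)%9 (0 for 0), and drops the redundant '-'/'/' replace since the digit filter ignores those characters anyway.
import Mathlib
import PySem

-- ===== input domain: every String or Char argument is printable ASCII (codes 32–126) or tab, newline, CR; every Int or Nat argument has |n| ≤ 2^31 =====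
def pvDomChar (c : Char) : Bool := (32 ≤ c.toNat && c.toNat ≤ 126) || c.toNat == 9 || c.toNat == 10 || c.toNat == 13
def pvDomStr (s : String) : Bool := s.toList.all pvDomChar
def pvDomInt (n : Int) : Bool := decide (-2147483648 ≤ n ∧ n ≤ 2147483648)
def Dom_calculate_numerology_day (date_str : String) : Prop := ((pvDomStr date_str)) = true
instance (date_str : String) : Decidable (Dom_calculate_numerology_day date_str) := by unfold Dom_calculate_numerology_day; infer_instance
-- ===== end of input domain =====

-- B replaces A's while-loop of repeated digit sums by the closed-form digital root
-- 1 + (total-1) % 9 (0 for 0) and drops the redundant '-'/'/' replace; equal for all inputs.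

-- ===== PORT A =====
-- int(d) for a single decimal digit character d (exact there; A only applies it to digit chars)
def pvDigitVal (c : Char) : Int := (c.toNat : Int) - 48
-- sum(int(d) for d in cs), as A's running sum
def pvCharSum (cs : List Char) : Int := cs.foldl (fun a c => a + pvDigitVal c) 0

-- the while-loop 'while total > 9: total = sum(int(d) for d in str(total))', with a fuel
-- bound as a totality guard only: each iteration strictly shrinks a non-negative total
-- (proved in pvReduce_eq below), so fuel total.toNat + 1 never runs out
def pvReduce : Nat → Int → Int
  | 0, t => t
  | fuel + 1, t =>
      if 9 < t then pvReduce fuel (pvCharSum (PySem.Int.toStr t).toList) else t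

def calculate_numerology_day (date_str : String) : Int :=
  let parts := PySem.Str.replace (PySem.Str.replace date_str "-" "") "/" ""
  let total : Int := pvCharSum (parts.toList.filter PySem.Chars.isdigit)
  pvReduce (total.toNat + 1) total

-- ===== PORT B =====
def calculate_numerology_day_alt (date_str : String) : Int :=
  let total : Int := ((date_str.toList.filter PySem.Chars.isdigit).map pvDigitVal).sum
  if total = 0 then 0 else 1 + PySem.Int.mod (total - 1) 9

-- ===== PRECONDITION & SPEC =====
def Spec_calculate_numerology_day (date_str : String) (out : Int) : Prop := out = calculate_numerology_day_alt date_str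
instance (date_str : String) (out : Int) : Decidable (Spec_calculate_numerology_day date_str out) := by unfold Spec_calculate_numerology_day; infer_instance

-- ===== CLAIM (what is proved, stated in full; the proofs are below) =====
def Claim_equal_calculate_numerology_day : Prop := ∀ (date_str : String), Dom_calculate_numerology_day date_str → Spec_calculate_numerology_day date_str (calculate_numerology_day date_str)

-- ===== LEMMAS AND PROOFS =====

-- digit sum on Nat, the value of A's inner sum(int(d) for d in str(total))
def pvDS (n : Nat) : Nat :=
  if n < 10 then n else n % 10 + pvDS (n / 10)
decreasing_by exact Nat.div_lt_self (by omega) (by omega)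

theorem pvCharSum_eq_sum (cs : List Char) :
    pvCharSum cs = (cs.map pvDigitVal).sum := by
  suffices h : ∀ a, cs.foldl (fun a c => a + pvDigitVal c) a = a + (cs.map pvDigitVal).sum by
    simpa [pvCharSum] using h 0
  induction cs with
  | nil => simp
  | cons c t ih => intro a; simp [List.foldl, ih]; ring

theorem pvDigitVal_digitChar (m : Nat) (hm : m < 10) :
    pvDigitVal (Nat.digitChar m) = (m : Int) := by
  interval_cases m <;> decide

theorem pvToDigitsCore_succ (fuel n : Nat) (acc : List Char) :
    Nat.toDigitsCore 10 (fuel + 1) n acc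
      = if n / 10 = 0 then (n % 10).digitChar :: acc
        else Nat.toDigitsCore 10 fuel (n / 10) ((n % 10).digitChar :: acc) := rfl

theorem pvToDigitsCore_sum (fuel : Nat) :
    ∀ (n : Nat) (acc : List Char), n < fuel →
      ((Nat.toDigitsCore 10 fuel n acc).map pvDigitVal).sum
        = (pvDS n : Int) + (acc.map pvDigitVal).sum := by
  induction fuel with
  | zero => intro n acc h; omega
  | succ fuel ih =>
    intro n acc h
    rw [pvToDigitsCore_succ]
    by_cases h0 : n / 10 = 0
    · rw [if_pos h0, List.map_cons, List.sum_cons,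
        pvDigitVal_digitChar (n % 10) (by omega), pvDS, if_pos (by omega)]
      omega
    · rw [if_neg h0, ih (n / 10) _ (by omega), List.map_cons, List.sum_cons,
        pvDigitVal_digitChar (n % 10) (by omega),
        show pvDS n = n % 10 + pvDS (n / 10) by rw [pvDS, if_neg (by omega)]]
      push_cast
      ring

theorem pvCharSum_toStr (t : Int) (ht : 0 ≤ t) :
    pvCharSum (PySem.Int.toStr t).toList = (pvDS t.toNat : Int) := by
  rw [pvCharSum_eq_sum, PySem.Int.toList_toStr, PySem.Int.toChars, if_neg (by omega),
    Nat.toDigits, pvToDigitsCore_sum (t.toNat + 1) t.toNat [] (by omega)]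
  simp

theorem pvDS_le (n : Nat) : pvDS n ≤ n := by
  induction n using Nat.strong_induction_on with
  | _ n ih =>
    rw [pvDS]
    split_ifs with h
    · exact le_refl n
    · have := ih (n / 10) (Nat.div_lt_self (by omega) (by omega))
      omega

theorem pvDS_lt (n : Nat) (h : 10 ≤ n) : pvDS n < n := by
  rw [pvDS, if_neg (by omega)]
  have := pvDS_le (n / 10)
  omega

theorem pvDS_mod9 (n : Nat) : pvDS n % 9 = n % 9 := by
  induction n using Nat.strong_induction_on with
  | _ n ih =>
    rw [pvDS]
    split_ifs with h
    · rfl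
    · have := ih (n / 10) (Nat.div_lt_self (by omega) (by omega))
      omega

theorem pvDS_pos (n : Nat) (h : 1 ≤ n) : 1 ≤ pvDS n := by
  induction n using Nat.strong_induction_on with
  | _ n ih =>
    rw [pvDS]
    split_ifs with h'
    · omega
    · have := ih (n / 10) (Nat.div_lt_self (by omega) (by omega)) (by omega)
      omega

-- enough fuel (more than total.toNat) makes the fuelled while-loop compute the digital root
theorem pvReduce_eq (fuel : Nat) :
    ∀ (t : Int), 0 ≤ t → t.toNat < fuel →
      pvReduce fuel t = if t = 0 then 0 else 1 + (t - 1) % 9 := by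
  induction fuel with
  | zero => intro t ht hf; omega
  | succ fuel ih =>
    intro t ht hf
    rw [pvReduce]
    by_cases h9 : 9 < t
    · rw [if_pos h9, pvCharSum_toStr t ht]
      have h1 := pvDS_pos t.toNat (by omega)
      have h2 := pvDS_mod9 t.toNat
      have h3 := pvDS_lt t.toNat (by omega)
      rw [ih ((pvDS t.toNat : Int)) (by positivity) (by omega)]
      rw [if_neg (by omega), if_neg (by omega)]
      omega
    · rw [if_neg h9]
      split_ifs with h0
      · exact h0
      · omega

-- replacing a single character by the empty string is filtering it out
theorem pvReplaceGo_single (ch : Char) :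
    ∀ (fuel : Nat) (l acc : List Char), l.length ≤ fuel →
      PySem.Chars.replace.go [ch] [] fuel l acc
        = acc.reverse ++ l.filter (fun c => c ≠ ch) := by
  intro fuel
  induction fuel with
  | zero =>
    intro l acc h
    have : l = [] := List.eq_nil_of_length_eq_zero (by omega)
    subst this
    simp [PySem.Chars.replace.go]
  | succ fuel ih =>
    intro l acc h
    match l with
    | [] => simp [PySem.Chars.replace.go]
    | c :: t =>
      rw [PySem.Chars.replace.go]
      by_cases hc : c = ch
      · subst hc
        have hpre : List.isPrefixOf [c] (c :: t) = true := by
          simp [List.isPrefixOf]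
        rw [if_pos hpre]
        have hdrop : List.drop [c].length (c :: t) = t := by simp
        rw [hdrop, List.reverse_nil, List.nil_append]
        simp only [List.length_cons] at h
        rw [ih t acc (by omega)]
        simp
      · have hpre : List.isPrefixOf [ch] (c :: t) = false := by
          simp [List.isPrefixOf]
          exact fun hh => absurd hh.symm hc
        rw [if_neg (by simp [hpre])]
        simp only [List.length_cons] at h
        rw [ih t (c :: acc) (by omega)]
        simp [hc]

theorem pvReplace_single (ch : Char) (cs : List Char) :
    PySem.Chars.replace cs [ch] [] = cs.filter (fun c => c ≠ ch) := by
  rw [PySem.Chars.replace]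
  simp only [List.isEmpty_cons]
  exact pvReplaceGo_single ch cs.length cs [] (le_refl _)

theorem pvFilter_digit_replace (ch : Char) (hch : PySem.Chars.isdigit ch = false) (cs : List Char) :
    (PySem.Chars.replace cs [ch] []).filter PySem.Chars.isdigit
      = cs.filter PySem.Chars.isdigit := by
  rw [pvReplace_single, List.filter_filter]
  apply List.filter_congr
  intro c _
  by_cases h : c = ch
  · subst h; simp [hch]
  · simp [h]

theorem pvSum_nonneg (cs : List Char) (h : ∀ c ∈ cs, PySem.Chars.isdigit c = true) :
    0 ≤ (cs.map pvDigitVal).sum := by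
  induction cs with
  | nil => simp
  | cons c t ih =>
    have hc := h c (by simp)
    simp only [PySem.Chars.isdigit, Bool.and_eq_true, decide_eq_true_eq] at hc
    have h48 : 48 ≤ c.toNat := hc.1
    have := ih (fun c hc => h c (by simp [hc]))
    simp only [List.map, List.sum_cons, pvDigitVal]
    omega

-- ===== VERDICT (by name: the statement is the Claim_ definition above) =====
theorem calculate_numerology_day_spec : Claim_equal_calculate_numerology_day := by
  intro s _
  unfold Spec_calculate_numerology_day
  have hfilter :
      ((PySem.Str.replace (PySem.Str.replace s "-" "") "/" "").toList.filter PySem.Chars.isdigit)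
        = s.toList.filter PySem.Chars.isdigit := by
    rw [PySem.Str.toList_replace, PySem.Str.toList_replace]
    have h1 : ("/" : String).toList = ['/'] := by decide
    have h2 : ("-" : String).toList = ['-'] := by decide
    have h0 : ("" : String).toList = [] := by decide
    rw [h1, h2, h0, pvFilter_digit_replace '/' (by decide), pvFilter_digit_replace '-' (by decide)]
  have hd : ∀ c ∈ s.toList.filter PySem.Chars.isdigit, PySem.Chars.isdigit c = true :=
    fun c hc => (List.mem_filter.mp hc).2
  have hnn := pvSum_nonneg _ hd
  have hmod : ∀ x : Int, PySem.Int.mod x 9 = x % 9 := by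
    intro x
    simp [PySem.Int.mod, Int.fmod_eq_emod]
  simp only [calculate_numerology_day, calculate_numerology_day_alt] at *
  rw [hfilter, pvCharSum_eq_sum,
    pvReduce_eq _ _ hnn (by omega), hmod]
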